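-- pv_equiv track=rewrite | github.com/ahmed-beloul/Machine-Learning-IA | ProjetIA_MORPION.py | alignement_jeu
-- ===== SOURCE A (Python) =====
-- taille = 12
--
-- def Maxi(a, b):
--     max=b
--     if a> b:
--         max=a
--     return max
--
-- def alignement_jeu(grillee, i , j):
--     balayage = 1
--     if grillee[i][j] != 0:
--         case = grillee[i][j]
--
--
--         joueur1 = 1
--         joueur2 = 1
--         lignesens1=i
--         colonnesens1=j+1
--         #premier sens
--         while (abs(lignesens1) < taille) and (abs(colonnesens1) < taille) and (grillee[lignesens1][colonnesens1] == case):
--             joueur1 +=1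
--             colonnesens1 += 1
--
--         #sens opposé
--         lignesens2=i
--         colonnesens2=j-1
--         while (abs(lignesens2) < taille) and (abs(colonnesens2) < taille) and (grillee[lignesens2][colonnesens2] == case):
--             joueur2 +=1
--             colonnesens2 -= 1
--         sol=[joueur1,joueur2]
--         c=sol[0]+sol[1]-1
--         balayage= Maxi(balayage, c) #ligne
--
--
--         joueur1 = 1
--         joueur2 = 1
--         lignesens1=i+1
--         colonnesens1=j
--         #premier sens
--         while (abs(lignesens1) < taille) and (abs(colonnesens1) < taille) and (grillee[lignesens1][colonnesens1] == case):
--             joueur1 +=1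
--             lignesens1 += 1
--
--         #sens opposé
--         lignesens2=i-1
--         colonnesens2=j
--         while (abs(lignesens2) < taille) and (abs(colonnesens2) < taille) and (grillee[lignesens2][colonnesens2] == case):
--             joueur2 +=1
--             lignesens2 -= 1
--         sol=[joueur1,joueur2]
--         c=sol[0]+sol[1]-1
--         balayage= Maxi(balayage, c) #colonne
--
--         joueur1 = 1
--         joueur2 = 1
--
--         lignesens1=i+1
--         colonnesens1=j+1
--         #premier sens
--         while (abs(lignesens1) < taille) and (abs(colonnesens1) < taille) and (grillee[lignesens1][colonnesens1] == case):
--             joueur1 +=1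
--             lignesens1 += 1
--             colonnesens1 += 1
--
--         #sens opposé
--         lignesens2=i-1
--         colonnesens2=j-1
--         while (abs(lignesens2) < taille) and (abs(colonnesens2) < taille) and (grillee[lignesens2][colonnesens2] == case):
--             joueur2 +=1
--             lignesens2 -= 1
--             colonnesens2 -= 1
--         sol=[joueur1,joueur2]
--         c=sol[0]+sol[1]-1
--         balayage= Maxi(balayage, c) # balaye diag1
--
--         joueur1 = 1
--         joueur2 = 1
--         lignesens1=i-1
--         colonnesens1=j+1
--         #premier sens
--         while (abs(lignesens1) < taille) and (abs(colonnesens1) < taille) and (grillee[lignesens1][colonnesens1] == case):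
--             joueur1 +=1
--             lignesens1 += -1
--             colonnesens1 += 1
--
--         #sens opposé
--         lignesens2=i+1
--         colonnesens2=j-1
--         while (abs(lignesens2) < taille) and (abs(colonnesens2) < taille) and (grillee[lignesens2][colonnesens2] == case):
--             joueur2 +=1
--             lignesens2 -= -1
--             colonnesens2 -= 1
--         sol=[joueur1,joueur2]
--         c=sol[0]+sol[1]-1
--         balayage= Maxi(balayage, c) # balaye diag2
--
--     return balayage #si balayage vaut 4 le jeu est fini.
-- ===== SOURCE B (Python) =====
-- taille = 12
--
-- def _walk(grillee, case, l, c, dl, dc):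
--     """Recursively count matching cells from (l,c) stepping by (dl,dc)."""
--     if abs(l) < taille and abs(c) < taille and grillee[l][c] == case:
--         return 1 + _walk(grillee, case, l + dl, c + dc, dl, dc)
--     return 0
--
-- def alignement_jeu(grillee, i, j):
--     if grillee[i][j] == 0:
--         return 1
--     case = grillee[i][j]
--     best = 1
--     for dl, dc in ((0, 1), (1, 0), (1, 1), (-1, 1)):
--         total = 1 + _walk(grillee, case, i + dl, j + dc, dl, dc) \
--                   + _walk(grillee, case, i - dl, j - dc, -dl, -dc)
--         best = max(best, total)
--     return best
-- ===== Notes on version B (the rewrite author's own statement) =====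
-- stated objective: simpler
-- what changed: Replaces A's eight inlined while-loops (with joueur1/joueur2 state, sol lists and a hand-written Maxi helper) by one recursive walk helper applied to the four axis vectors and their negations, taking the maximum with builtin max.
import Mathlib
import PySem

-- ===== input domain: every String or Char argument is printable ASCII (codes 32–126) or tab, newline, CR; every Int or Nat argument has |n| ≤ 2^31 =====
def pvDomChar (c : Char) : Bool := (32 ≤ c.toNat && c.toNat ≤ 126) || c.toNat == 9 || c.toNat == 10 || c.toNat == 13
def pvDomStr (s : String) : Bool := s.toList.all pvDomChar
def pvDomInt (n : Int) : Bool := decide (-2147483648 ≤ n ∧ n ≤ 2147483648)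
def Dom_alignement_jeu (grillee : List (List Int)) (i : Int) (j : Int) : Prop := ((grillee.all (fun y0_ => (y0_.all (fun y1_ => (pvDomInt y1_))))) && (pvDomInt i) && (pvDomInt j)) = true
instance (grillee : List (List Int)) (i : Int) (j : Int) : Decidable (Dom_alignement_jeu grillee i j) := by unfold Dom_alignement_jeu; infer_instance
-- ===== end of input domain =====

-- B replaces A's eight inlined while-loops and hand-written Maxi by one recursive
-- directional walk applied to four axis vectors and their negations, with builtin max (simpler).


-- shared cell access grillee[l][c]; the getD defaults are only reached outside Pre_
def pvCell' (grillee : List (List Int)) (l c : Int) : Int :=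
  PySem.List.pyGetD (PySem.List.pyGetD grillee l []) c 0

-- ===== PORT A =====
def Maxi (a b : Int) : Int :=
  let max := b
  if a > b then a else max

-- each of A's eight while-loops, fuel-bounded (the abs<12 guard caps every loop at 23
-- iterations, so fuel 32 is never exhausted); state = (joueur, ligne, colonne)
def aLoop1 (g : List (List Int)) (case : Int) : Nat → Int → Int → Int → Int
  | 0, joueur, _, _ => joueur
  | fuel+1, joueur, l, c =>
    if l.natAbs < 12 && c.natAbs < 12 && pvCell' g l c == case then
      aLoop1 g case fuel (joueur + 1) l (c + 1)
    else joueur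

def aLoop2 (g : List (List Int)) (case : Int) : Nat → Int → Int → Int → Int
  | 0, joueur, _, _ => joueur
  | fuel+1, joueur, l, c =>
    if l.natAbs < 12 && c.natAbs < 12 && pvCell' g l c == case then
      aLoop2 g case fuel (joueur + 1) l (c - 1)
    else joueur

def aLoop3 (g : List (List Int)) (case : Int) : Nat → Int → Int → Int → Int
  | 0, joueur, _, _ => joueur
  | fuel+1, joueur, l, c =>
    if l.natAbs < 12 && c.natAbs < 12 && pvCell' g l c == case then
      aLoop3 g case fuel (joueur + 1) (l + 1) c
    else joueur

def aLoop4 (g : List (List Int)) (case : Int) : Nat → Int → Int → Int → Int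
  | 0, joueur, _, _ => joueur
  | fuel+1, joueur, l, c =>
    if l.natAbs < 12 && c.natAbs < 12 && pvCell' g l c == case then
      aLoop4 g case fuel (joueur + 1) (l - 1) c
    else joueur

def aLoop5 (g : List (List Int)) (case : Int) : Nat → Int → Int → Int → Int
  | 0, joueur, _, _ => joueur
  | fuel+1, joueur, l, c =>
    if l.natAbs < 12 && c.natAbs < 12 && pvCell' g l c == case then
      aLoop5 g case fuel (joueur + 1) (l + 1) (c + 1)
    else joueur

def aLoop6 (g : List (List Int)) (case : Int) : Nat → Int → Int → Int → Int
  | 0, joueur, _, _ => joueur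
  | fuel+1, joueur, l, c =>
    if l.natAbs < 12 && c.natAbs < 12 && pvCell' g l c == case then
      aLoop6 g case fuel (joueur + 1) (l - 1) (c - 1)
    else joueur

def aLoop7 (g : List (List Int)) (case : Int) : Nat → Int → Int → Int → Int
  | 0, joueur, _, _ => joueur
  | fuel+1, joueur, l, c =>
    if l.natAbs < 12 && c.natAbs < 12 && pvCell' g l c == case then
      aLoop7 g case fuel (joueur + 1) (l - 1) (c + 1)
    else joueur

def aLoop8 (g : List (List Int)) (case : Int) : Nat → Int → Int → Int → Int
  | 0, joueur, _, _ => joueur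
  | fuel+1, joueur, l, c =>
    if l.natAbs < 12 && c.natAbs < 12 && pvCell' g l c == case then
      aLoop8 g case fuel (joueur + 1) (l + 1) (c - 1)
    else joueur

def alignement_jeu (grillee : List (List Int)) (i : Int) (j : Int) : Int :=
  let balayage : Int := 1
  if pvCell' grillee i j != 0 then
    let case := pvCell' grillee i j
    -- ligne
    let joueur1 := aLoop1 grillee case 32 1 i (j + 1)
    let joueur2 := aLoop2 grillee case 32 1 i (j - 1)
    let sol := [joueur1, joueur2]
    let c := PySem.List.pyGetD sol 0 0 + PySem.List.pyGetD sol 1 0 - 1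
    let balayage := Maxi balayage c
    -- colonne
    let joueur1 := aLoop3 grillee case 32 1 (i + 1) j
    let joueur2 := aLoop4 grillee case 32 1 (i - 1) j
    let sol := [joueur1, joueur2]
    let c := PySem.List.pyGetD sol 0 0 + PySem.List.pyGetD sol 1 0 - 1
    let balayage := Maxi balayage c
    -- diag1
    let joueur1 := aLoop5 grillee case 32 1 (i + 1) (j + 1)
    let joueur2 := aLoop6 grillee case 32 1 (i - 1) (j - 1)
    let sol := [joueur1, joueur2]
    let c := PySem.List.pyGetD sol 0 0 + PySem.List.pyGetD sol 1 0 - 1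
    let balayage := Maxi balayage c
    -- diag2
    let joueur1 := aLoop7 grillee case 32 1 (i - 1) (j + 1)
    let joueur2 := aLoop8 grillee case 32 1 (i + 1) (j - 1)
    let sol := [joueur1, joueur2]
    let c := PySem.List.pyGetD sol 0 0 + PySem.List.pyGetD sol 1 0 - 1
    let balayage := Maxi balayage c
    balayage
  else balayage

-- ===== PORT B =====
-- recursive walk: count matching cells from (l,c) stepping by (dl,dc); same fuel bound
def bWalk (g : List (List Int)) (case dl dc : Int) : Nat → Int → Int → Int
  | 0, _, _ => 0
  | fuel+1, l, c =>
    if l.natAbs < 12 && c.natAbs < 12 && pvCell' g l c == case then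
      1 + bWalk g case dl dc fuel (l + dl) (c + dc)
    else 0

def alignement_jeu_alt (grillee : List (List Int)) (i : Int) (j : Int) : Int :=
  if pvCell' grillee i j == 0 then 1
  else
    let case := pvCell' grillee i j
    ([((0 : Int), (1 : Int)), (1, 0), (1, 1), (-1, 1)]).foldl
      (fun best d =>
        let total := 1 + bWalk grillee case d.1 d.2 32 (i + d.1) (j + d.2)
                       + bWalk grillee case (-d.1) (-d.2) 32 (i - d.1) (j - d.2)
        max best total) 1

-- ===== PRECONDITION & SPEC =====
-- Pre_ is exactly the inputs on which Python A returns normally: (i, j) is a valid index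
-- pair, and when the selected cell is nonzero every outward scan is safe — along each of the
-- eight rays, any position within the abs<12 window whose whole ray prefix matched the cell
-- is itself a valid index (otherwise the scan raises IndexError there).
def pvInb (l c : Int) : Bool := l.natAbs < 12 && c.natAbs < 12
def pvValidIdx (g : List (List Int)) (l c : Int) : Bool :=
  decide (PySem.Raise.InRange g.length l) &&
  decide (PySem.Raise.InRange (PySem.List.pyGetD g l []).length c)
def pvSafeRay (g : List (List Int)) (case i j dl dc : Int) : Prop :=
  ∀ K ∈ List.range 26, 1 ≤ K →
    (∀ M ∈ List.range K, 1 ≤ M →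
      (pvInb (i + M * dl) (j + M * dc) && pvValidIdx g (i + M * dl) (j + M * dc) &&
        (pvCell' g (i + M * dl) (j + M * dc) == case)) = true) →
    pvInb (i + K * dl) (j + K * dc) = true → pvValidIdx g (i + K * dl) (j + K * dc) = true
def Pre_alignement_jeu (grillee : List (List Int)) (i : Int) (j : Int) : Prop :=
  pvValidIdx grillee i j = true ∧
  (pvCell' grillee i j ≠ 0 →
    ∀ d ∈ ([((0 : Int), (1 : Int)), (0, -1), (1, 0), (-1, 0), (1, 1), (-1, -1), (-1, 1), (1, -1)]),
      pvSafeRay grillee (pvCell' grillee i j) i j d.1 d.2)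
instance (grillee : List (List Int)) (i : Int) (j : Int) : Decidable (Pre_alignement_jeu grillee i j) := by unfold Pre_alignement_jeu pvSafeRay; infer_instance

def pvWitness_alignement_jeu : List (List Int) × Int × Int := ([[0, 1], [1, 0]], 0, 0)

def Spec_alignement_jeu (grillee : List (List Int)) (i : Int) (j : Int) (out : Int) : Prop := out = alignement_jeu_alt grillee i j
instance (grillee : List (List Int)) (i : Int) (j : Int) (out : Int) : Decidable (Spec_alignement_jeu grillee i j out) := by unfold Spec_alignement_jeu; infer_instance

-- ===== CLAIM (what is proved, stated in full; the proofs are below) =====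
def Claim_equal_alignement_jeu : Prop := ∀ (grillee : List (List Int)) (i : Int) (j : Int), Dom_alignement_jeu grillee i j → Pre_alignement_jeu grillee i j → Spec_alignement_jeu grillee i j (alignement_jeu grillee i j)

-- ===== LEMMAS AND PROOFS =====
theorem aLoop1_eq_bWalk (g : List (List Int)) (case : Int) (fuel : Nat) :
    ∀ (joueur l c : Int), aLoop1 g case fuel joueur l c = joueur + bWalk g case 0 1 fuel l c := by
  induction fuel with
  | zero => intro joueur l c; simp [aLoop1, bWalk]
  | succ n ih =>
    intro joueur l c
    simp only [aLoop1, bWalk]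
    split
    · rw [ih]; ring_nf
    · omega

theorem aLoop2_eq_bWalk (g : List (List Int)) (case : Int) (fuel : Nat) :
    ∀ (joueur l c : Int), aLoop2 g case fuel joueur l c = joueur + bWalk g case 0 (-1) fuel l c := by
  induction fuel with
  | zero => intro joueur l c; simp [aLoop2, bWalk]
  | succ n ih =>
    intro joueur l c
    simp only [aLoop2, bWalk]
    split
    · rw [ih]; ring_nf
    · omega

theorem aLoop3_eq_bWalk (g : List (List Int)) (case : Int) (fuel : Nat) :
    ∀ (joueur l c : Int), aLoop3 g case fuel joueur l c = joueur + bWalk g case 1 0 fuel l c := by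
  induction fuel with
  | zero => intro joueur l c; simp [aLoop3, bWalk]
  | succ n ih =>
    intro joueur l c
    simp only [aLoop3, bWalk]
    split
    · rw [ih]; ring_nf
    · omega

theorem aLoop4_eq_bWalk (g : List (List Int)) (case : Int) (fuel : Nat) :
    ∀ (joueur l c : Int), aLoop4 g case fuel joueur l c = joueur + bWalk g case (-1) 0 fuel l c := by
  induction fuel with
  | zero => intro joueur l c; simp [aLoop4, bWalk]
  | succ n ih =>
    intro joueur l c
    simp only [aLoop4, bWalk]
    split
    · rw [ih]; ring_nf
    · omega

theorem aLoop5_eq_bWalk (g : List (List Int)) (case : Int) (fuel : Nat) :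
    ∀ (joueur l c : Int), aLoop5 g case fuel joueur l c = joueur + bWalk g case 1 1 fuel l c := by
  induction fuel with
  | zero => intro joueur l c; simp [aLoop5, bWalk]
  | succ n ih =>
    intro joueur l c
    simp only [aLoop5, bWalk]
    split
    · rw [ih]; ring_nf
    · omega

theorem aLoop6_eq_bWalk (g : List (List Int)) (case : Int) (fuel : Nat) :
    ∀ (joueur l c : Int), aLoop6 g case fuel joueur l c = joueur + bWalk g case (-1) (-1) fuel l c := by
  induction fuel with
  | zero => intro joueur l c; simp [aLoop6, bWalk]
  | succ n ih =>
    intro joueur l c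
    simp only [aLoop6, bWalk]
    split
    · rw [ih]; ring_nf
    · omega

theorem aLoop7_eq_bWalk (g : List (List Int)) (case : Int) (fuel : Nat) :
    ∀ (joueur l c : Int), aLoop7 g case fuel joueur l c = joueur + bWalk g case (-1) 1 fuel l c := by
  induction fuel with
  | zero => intro joueur l c; simp [aLoop7, bWalk]
  | succ n ih =>
    intro joueur l c
    simp only [aLoop7, bWalk]
    split
    · rw [ih]; ring_nf
    · omega

theorem aLoop8_eq_bWalk (g : List (List Int)) (case : Int) (fuel : Nat) :
    ∀ (joueur l c : Int), aLoop8 g case fuel joueur l c = joueur + bWalk g case 1 (-1) fuel l c := by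
  induction fuel with
  | zero => intro joueur l c; simp [aLoop8, bWalk]
  | succ n ih =>
    intro joueur l c
    simp only [aLoop8, bWalk]
    split
    · rw [ih]; ring_nf
    · omega

theorem Maxi_eq_max (a b : Int) : Maxi a b = max a b := by
  simp only [Maxi]
  split_ifs with h <;> omega

-- ===== VERDICT (by name: the statement is the Claim_ definition above) =====
theorem alignement_jeu_spec : Claim_equal_alignement_jeu := by
  intro g i j _hDom _hPre
  unfold Spec_alignement_jeu alignement_jeu alignement_jeu_alt
  by_cases h0 : pvCell' g i j = 0
  · simp [h0]
  · simp only [h0, bne_iff_ne, ne_eq, not_false_eq_true, if_true, beq_iff_eq,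
      List.foldl_cons, List.foldl_nil]
    simp only [aLoop1_eq_bWalk, aLoop2_eq_bWalk, aLoop3_eq_bWalk, aLoop4_eq_bWalk,
      aLoop5_eq_bWalk, aLoop6_eq_bWalk, aLoop7_eq_bWalk, aLoop8_eq_bWalk,
      Maxi_eq_max]
    simp only [PySem.List.pyGetD, PySem.List.pyGet?, PySem.List.pyIdx?]
    norm_num
    ring_nf
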